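-- pv_equiv track=rewrite | github.com/Shreyab1802/Code_Python | MicrosoftRecent/B_W_N*M_2D_Grid.py | minOperationToSymmetric
-- ===== SOURCE A (Python) =====
-- import math
--
-- def minOperationToSymmetric(grid):
--     n = len(grid)
--     m = len(grid[0])
--     totalCost = 0
--
--     for ii in range(math.ceil(n / 2)):
--         for jj in range(math.ceil(m / 2)):
--             numBlack = 0
--             numWhite = 0
--             iis = [ii]
--             jjs = [jj]
--             if ii != n - 1 - ii: iis += [n - 1 - ii]
--             if jj != m - 1 - jj: jjs += [m - 1 - jj]
--
--             for i2 in iis: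
--                 for j2 in jjs:
--                     if grid[i2][j2] == 'B':
--                         numBlack += 1
--                     else:
--                         numWhite += 1
--             totalCost += min(numBlack, numWhite)
--     return totalCost
-- ===== SOURCE B (Python) =====
-- def minOperationToSymmetric(grid):
--     n = len(grid)
--     m = len(grid[0])
--     total = {}
--     black = {}
--     for i in range(n):
--         for j in range(m):
--             key = (min(i, n - 1 - i), min(j, m - 1 - j))
--             total[key] = total.get(key, 0) + 1
--             if grid[i][j] == 'B':
--                 black[key] = black.get(key, 0) + 1
--     return sum(min(black.get(k, 0), t - black.get(k, 0)) for k, t in total.items())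
-- ===== Notes on version B (the rewrite author's own statement) =====
-- stated objective: alternative
-- what changed: Instead of A's quadrant double loop that builds mirror-index lists and re-reads up to four cells per orbit, B makes one pass over every cell, grouping cells by their canonical orbit key (min(i,n-1-i), min(j,m-1-j)) into dictionaries of total and black tallies, then sums min(black, total-black) over the dictionary.
import Mathlib
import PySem

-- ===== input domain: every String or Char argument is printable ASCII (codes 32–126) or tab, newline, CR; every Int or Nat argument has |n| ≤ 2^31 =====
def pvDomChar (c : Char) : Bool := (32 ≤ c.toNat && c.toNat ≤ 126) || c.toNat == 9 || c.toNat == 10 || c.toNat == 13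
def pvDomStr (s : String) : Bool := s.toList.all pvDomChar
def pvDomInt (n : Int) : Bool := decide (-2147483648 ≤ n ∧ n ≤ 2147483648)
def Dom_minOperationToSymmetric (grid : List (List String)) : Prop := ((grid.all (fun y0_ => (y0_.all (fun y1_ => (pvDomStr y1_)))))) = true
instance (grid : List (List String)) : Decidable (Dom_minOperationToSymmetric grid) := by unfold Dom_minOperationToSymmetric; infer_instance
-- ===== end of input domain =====

-- B replaces A's quadrant double loop (mirror-index lists, re-reading up to 4 cells per orbit) by a single
-- full-grid pass grouping every cell by its canonical orbit key into dictionaries of (total, black) tallies: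
-- alternative decomposition, same cost.


-- grid[i][j] with defaults; Pre_ restricts to inputs where every access is in range
def pvCell (grid : List (List String)) (i j : Int) : String :=
  PySem.List.pyGetD (PySem.List.pyGetD grid i []) j ""

-- ===== PORT A =====
-- math.ceil(n / 2) is ported as -((-n) // 2): exact here since n, m are list lengths (≥ 0,
-- far below 2^53, so the float n / 2 is exact).
def minOperationToSymmetric (grid : List (List String)) : Int :=
  let n : Int := grid.length
  let m : Int := (PySem.List.pyGetD grid 0 ([] : List String)).length
  (PySem.List.pyRange 0 (-(PySem.Int.floordiv (-n) 2)) 1).foldl (fun totalCost ii =>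
    (PySem.List.pyRange 0 (-(PySem.Int.floordiv (-m) 2)) 1).foldl (fun totalCost jj =>
      let iis : List Int := [ii] ++ (if ii ≠ n - 1 - ii then [n - 1 - ii] else [])
      let jjs : List Int := [jj] ++ (if jj ≠ m - 1 - jj then [m - 1 - jj] else [])
      let bw : Int × Int := iis.foldl (fun bw i2 =>
        jjs.foldl (fun bw j2 =>
          if pvCell grid i2 j2 == "B" then (bw.1 + 1, bw.2) else (bw.1, bw.2 + 1)) bw) (0, 0)
      totalCost + min bw.1 bw.2) totalCost) 0

-- ===== PORT B =====
-- one pass over all cells: two dicts keyed by the canonical orbit key (min(i,n-1-i), min(j,m-1-j))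
-- tally each orbit's cell count and black count; afterwards sum min(black, total - black) over the items
def minOperationToSymmetric_alt (grid : List (List String)) : Int :=
  let n : Int := grid.length
  let m : Int := (PySem.List.pyGetD grid 0 ([] : List String)).length
  let st : PySem.Dict (Int × Int) Int × PySem.Dict (Int × Int) Int :=
    (PySem.List.pyRange 0 n 1).foldl (fun st i =>
      (PySem.List.pyRange 0 m 1).foldl (fun st j =>
        let key : Int × Int := (min i (n - 1 - i), min j (m - 1 - j))
        (st.1.insert key (st.1.getD key 0 + 1),
         if pvCell grid i j == "B" then st.2.insert key (st.2.getD key 0 + 1) else st.2)) st)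
      (PySem.Dict.empty, PySem.Dict.empty)
  (st.1.items.map (fun kt => min (st.2.getD kt.1 0) (kt.2 - st.2.getD kt.1 0))).sum

-- ===== PRECONDITION & SPEC =====
-- Pre_ excludes exactly the inputs where Python A raises IndexError: the empty grid
-- (grid[0]) and ragged grids with a row shorter than row 0 (A reads every column < len(grid[0]) of every row).
def Pre_minOperationToSymmetric (grid : List (List String)) : Prop :=
  grid ≠ [] ∧ ∀ row ∈ grid, (grid.headI).length ≤ row.length
instance (grid : List (List String)) : Decidable (Pre_minOperationToSymmetric grid) := by
  unfold Pre_minOperationToSymmetric; infer_instance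

def pvWitness_minOperationToSymmetric : List (List String) := [["B", "W", "B"], ["W", "W", "B"]]

def Spec_minOperationToSymmetric (grid : List (List String)) (out : Int) : Prop := out = minOperationToSymmetric_alt grid
instance (grid : List (List String)) (out : Int) : Decidable (Spec_minOperationToSymmetric grid out) := by unfold Spec_minOperationToSymmetric; infer_instance

-- ===== CLAIM (what is proved, stated in full; the proofs are below) =====
def Claim_equal_minOperationToSymmetric : Prop := ∀ (grid : List (List String)), Dom_minOperationToSymmetric grid → Pre_minOperationToSymmetric grid → Spec_minOperationToSymmetric grid (minOperationToSymmetric grid)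

-- ===== LEMMAS AND PROOFS =====

-- the flat list of all cell coordinates, the canonical orbit key, and per-key counts
def pvCells (n m : Int) : List (Int × Int) :=
  (PySem.List.pyRange 0 n 1).flatMap (fun i => (PySem.List.pyRange 0 m 1).map (fun j => (i, j)))

def pvKeyF (n m : Int) (p : Int × Int) : Int × Int := (min p.1 (n - 1 - p.1), min p.2 (m - 1 - p.2))

def pvCT (n m : Int) (k : Int × Int) : Int := (((pvCells n m).map (pvKeyF n m)).count k : Int)

def pvCB (grid : List (List String)) (n m : Int) (k : Int × Int) : Int :=
  ((((pvCells n m).filter (fun p => pvCell grid p.1 p.2 == "B")).map (pvKeyF n m)).count k : Int)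

-- the quadrant key list A's double loop ranges over
def pvQuad (n m : Int) : List (Int × Int) :=
  (PySem.List.pyRange 0 (-(PySem.Int.floordiv (-n) 2)) 1).flatMap
    (fun a => (PySem.List.pyRange 0 (-(PySem.Int.floordiv (-m) 2)) 1).map (fun c => (a, c)))

def pvTermA (grid : List (List String)) (n m ii jj : Int) : Int :=
  let iis : List Int := [ii] ++ (if ii ≠ n - 1 - ii then [n - 1 - ii] else [])
  let jjs : List Int := [jj] ++ (if jj ≠ m - 1 - jj then [m - 1 - jj] else [])
  let bw : Int × Int := iis.foldl (fun bw i2 =>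
    jjs.foldl (fun bw j2 =>
      if pvCell grid i2 j2 == "B" then (bw.1 + 1, bw.2) else (bw.1, bw.2 + 1)) bw) (0, 0)
  min bw.1 bw.2

lemma foldl_cells {σ : Type} (F : σ → Int → Int → σ) (n m : Int) (init : σ) :
    (pvCells n m).foldl (fun st p => F st p.1 p.2) init =
      (PySem.List.pyRange 0 n 1).foldl (fun st i =>
        (PySem.List.pyRange 0 m 1).foldl (fun st j => F st i j) st) init := by
  simp [pvCells, List.flatMap_def, List.foldl_flatten, List.foldl_map]

lemma fold_eq (grid : List (List String)) (n m : Int) :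
    ((PySem.List.pyRange 0 n 1).foldl (fun st i =>
      (PySem.List.pyRange 0 m 1).foldl (fun st j =>
        ((st.1.insert (min i (n - 1 - i), min j (m - 1 - j)) (st.1.getD (min i (n - 1 - i), min j (m - 1 - j)) 0 + 1),
          if pvCell grid i j == "B" then st.2.insert (min i (n - 1 - i), min j (m - 1 - j)) (st.2.getD (min i (n - 1 - i), min j (m - 1 - j)) 0 + 1) else st.2) :
          PySem.Dict (Int × Int) Int × PySem.Dict (Int × Int) Int)) st)
      ((PySem.Dict.empty : PySem.Dict (Int × Int) Int), (PySem.Dict.empty : PySem.Dict (Int × Int) Int)))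
    = (((pvCells n m).map (pvKeyF n m)).foldl (fun d k => d.insert k (d.getD k 0 + 1)) PySem.Dict.empty,
       (((pvCells n m).filter (fun p => pvCell grid p.1 p.2 == "B")).map (pvKeyF n m)).foldl (fun d k => d.insert k (d.getD k 0 + 1)) PySem.Dict.empty) := by
  rw [← foldl_cells (F := fun st i j =>
        ((st.1.insert (min i (n - 1 - i), min j (m - 1 - j)) (st.1.getD (min i (n - 1 - i), min j (m - 1 - j)) 0 + 1),
          if pvCell grid i j == "B" then st.2.insert (min i (n - 1 - i), min j (m - 1 - j)) (st.2.getD (min i (n - 1 - i), min j (m - 1 - j)) 0 + 1) else st.2) :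
          PySem.Dict (Int × Int) Int × PySem.Dict (Int × Int) Int))]
  refine Eq.trans (PySem.List.foldl_prod_mk
      (fun (d : PySem.Dict (Int × Int) Int) (p : Int × Int) => d.insert (min p.1 (n - 1 - p.1), min p.2 (m - 1 - p.2)) (d.getD (min p.1 (n - 1 - p.1), min p.2 (m - 1 - p.2)) 0 + 1))
      (fun (d : PySem.Dict (Int × Int) Int) (p : Int × Int) => if pvCell grid p.1 p.2 == "B" then d.insert (min p.1 (n - 1 - p.1), min p.2 (m - 1 - p.2)) (d.getD (min p.1 (n - 1 - p.1), min p.2 (m - 1 - p.2)) 0 + 1) else d)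
      (pvCells n m) PySem.Dict.empty PySem.Dict.empty) ?_
  refine Prod.ext ?_ ?_
  · rw [List.foldl_map]; simp [pvKeyF]
  · rw [List.foldl_map, PySem.List.foldl_if_eq_foldl_filter
        (p := fun p : Int × Int => pvCell grid p.1 p.2 == "B")
        (f := fun (d : PySem.Dict (Int × Int) Int) (p : Int × Int) => d.insert (min p.1 (n - 1 - p.1), min p.2 (m - 1 - p.2)) (d.getD (min p.1 (n - 1 - p.1), min p.2 (m - 1 - p.2)) 0 + 1))]
    rw [List.foldl_map]; simp [pvKeyF]

lemma B_char (grid : List (List String)) :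
    minOperationToSymmetric_alt grid =
      ((PySem.Set.ofList ((pvCells (grid.length : Int)
            ((PySem.List.pyGetD grid 0 ([] : List String)).length : Int)).map
            (pvKeyF (grid.length : Int) ((PySem.List.pyGetD grid 0 ([] : List String)).length : Int)))).map
        (fun k => min (pvCB grid (grid.length : Int) ((PySem.List.pyGetD grid 0 ([] : List String)).length : Int) k)
          (pvCT (grid.length : Int) ((PySem.List.pyGetD grid 0 ([] : List String)).length : Int) k
            - pvCB grid (grid.length : Int) ((PySem.List.pyGetD grid 0 ([] : List String)).length : Int) k))).sum := by
  simp only [minOperationToSymmetric_alt]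
  rw [fold_eq grid (grid.length : Int) ((PySem.List.pyGetD grid 0 ([] : List String)).length : Int)]
  have hnodup := PySem.Dict.nodup_keys_foldl_insert
      ((pvCells (grid.length : Int) ((PySem.List.pyGetD grid 0 ([] : List String)).length : Int)).map
        (pvKeyF (grid.length : Int) ((PySem.List.pyGetD grid 0 ([] : List String)).length : Int)))
      (fun d k => d.getD k 0 + 1) (PySem.Dict.empty : PySem.Dict (Int × Int) Int)
      PySem.Dict.nodup_keys_empty
  rw [PySem.Dict.items_eq_map_keys _ hnodup 0]
  rw [PySem.Dict.keys_foldl_insert]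
  rw [List.map_map]
  simp only [PySem.Dict.keys_empty, PySem.Dict.getD_foldl_insert_add_one,
    PySem.Dict.getD_empty, zero_add, pvCT, pvCB]
  simp only [Function.comp_def, PySem.Set.update, ← PySem.Set.ofList_eq_foldl]

lemma A_quad (grid : List (List String)) :
    minOperationToSymmetric grid =
      ((pvQuad (grid.length : Int) ((PySem.List.pyGetD grid 0 ([] : List String)).length : Int)).map
        (fun k => pvTermA grid (grid.length : Int)
          ((PySem.List.pyGetD grid 0 ([] : List String)).length : Int) k.1 k.2)).sum := by
  simp only [minOperationToSymmetric, pvTermA, pvQuad, List.flatMap_def, List.map_flatten,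
    List.sum_flatten, List.map_map, Function.comp_def, PySem.List.foldl_add, zero_add]

def pvSum (f : Int → Int) (a b : Int) : Int := ((PySem.List.pyRange a b 1).map f).sum

lemma pvSum_congr {f g : Int → Int} {a b : Int} (h : ∀ x, a ≤ x → x < b → f x = g x) :
    pvSum f a b = pvSum g a b := by
  unfold pvSum
  congr 1
  apply List.map_congr_left
  intro x hx
  rw [PySem.List.mem_pyRange_one] at hx
  exact h x hx.1 hx.2

lemma pvSum_zero {f : Int → Int} {a b : Int} (h : ∀ x, a ≤ x → x < b → f x = 0) :
    pvSum f a b = 0 := by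
  unfold pvSum
  apply List.sum_eq_zero
  intro y hy
  obtain ⟨x, hx, rfl⟩ := List.mem_map.mp hy
  rw [PySem.List.mem_pyRange_one] at hx
  exact h x hx.1 hx.2

lemma pvSum_split (f : Int → Int) (a c b : Int) (h1 : a ≤ c) (h2 : c ≤ b) :
    pvSum f a b = pvSum f a c + pvSum f c b := by
  unfold pvSum
  rw [PySem.List.pyRange_one_append a c b h1 h2, List.map_append, List.sum_append]

lemma pvSum_singleton (f : Int → Int) (a : Int) : pvSum f a (a + 1) = f a := by
  unfold pvSum
  rw [PySem.List.pyRange_one_singleton]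
  simp

lemma pvSum_support_pair (f : Int → Int) (lo hi a b : Int)
    (ha0 : lo ≤ a) (hab : a ≤ b) (hb : b < hi)
    (h0 : ∀ x, lo ≤ x → x < hi → x ≠ a → x ≠ b → f x = 0) :
    pvSum f lo hi = if a = b then f a else f a + f b := by
  by_cases h : a = b
  · subst h
    rw [if_pos rfl, pvSum_split f lo a hi (by omega) (by omega),
      pvSum_split f a (a + 1) hi (by omega) (by omega), pvSum_singleton,
      pvSum_zero (f := f) (a := lo) (b := a) (fun x h1 h2 => h0 x (by omega) (by omega) (by omega) (by omega)),
      pvSum_zero (f := f) (a := a + 1) (b := hi) (fun x h1 h2 => h0 x (by omega) (by omega) (by omega) (by omega))]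
    ring
  · rw [if_neg h, pvSum_split f lo a hi (by omega) (by omega),
      pvSum_split f a (a + 1) hi (by omega) (by omega), pvSum_singleton,
      pvSum_split f (a + 1) b hi (by omega) (by omega),
      pvSum_split f b (b + 1) hi (by omega) (by omega), pvSum_singleton,
      pvSum_zero (f := f) (a := lo) (b := a) (fun x h1 h2 => h0 x (by omega) (by omega) (by omega) (by omega)),
      pvSum_zero (f := f) (a := a + 1) (b := b) (fun x h1 h2 => h0 x (by omega) (by omega) (by omega) (by omega)),
      pvSum_zero (f := f) (a := b + 1) (b := hi) (fun x h1 h2 => h0 x (by omega) (by omega) (by omega) (by omega))]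
    ring

lemma countP_cells (n m : Int) (q : Int × Int → Bool) :
    (((pvCells n m).countP q : Nat) : Int) = pvSum (fun i => pvSum (fun j => if q (i, j) then 1 else 0) 0 m) 0 n := by
  rw [← PySem.List.sum_map_ite_one_zero]
  simp [pvCells, pvSum, List.flatMap_def, List.map_flatten, List.sum_flatten, List.map_map, Function.comp_def]

lemma countP_orbit (n m a c : Int) (q : Int → Int → Bool)
    (ha0 : 0 ≤ a) (ha : 2 * a < n) (hc0 : 0 ≤ c) (hc : 2 * c < m) :
    (((pvCells n m).countP (fun p => (pvKeyF n m p == (a, c)) && q p.1 p.2) : Nat) : Int)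
      = (if a = n - 1 - a then
          ((if q a c then 1 else 0) + (if c = m - 1 - c then 0 else (if q a (m - 1 - c) then 1 else 0)))
        else
          ((if q a c then 1 else 0) + (if c = m - 1 - c then 0 else (if q a (m - 1 - c) then 1 else 0)))
          + ((if q (n - 1 - a) c then 1 else 0) + (if c = m - 1 - c then 0 else (if q (n - 1 - a) (m - 1 - c) then 1 else 0)))) := by
  rw [countP_cells]
  have hinner : ∀ i : Int,
      pvSum (fun j => if (pvKeyF n m (i, j) == (a, c)) && q i j then 1 else 0) 0 m
        = if min i (n - 1 - i) = a then
            ((if q i c then 1 else 0) + (if c = m - 1 - c then 0 else (if q i (m - 1 - c) then 1 else 0)))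
          else 0 := by
    intro i
    have e1 : (if (pvKeyF n m (i, c) == (a, c)) && q i c then (1 : Int) else 0)
        = if min i (n - 1 - i) = a then (if q i c then 1 else 0) else 0 := by
      have h1 : min c (m - 1 - c) = c := by omega
      by_cases hi : min i (n - 1 - i) = a <;> by_cases hq : q i c <;> simp [pvKeyF, h1, hi, hq]
    have e2 : (if (pvKeyF n m (i, m - 1 - c) == (a, c)) && q i (m - 1 - c) then (1 : Int) else 0)
        = if min i (n - 1 - i) = a then (if q i (m - 1 - c) then 1 else 0) else 0 := by
      have h2 : min (m - 1 - c) (m - 1 - (m - 1 - c)) = c := by omega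
      by_cases hi : min i (n - 1 - i) = a <;> by_cases hq : q i (m - 1 - c) <;> (simp [pvKeyF, h2, hi, hq]; try omega)
    rw [pvSum_support_pair _ 0 m c (m - 1 - c) (by omega) (by omega) (by omega) ?_]
    · by_cases hcc : c = m - 1 - c
      · rw [if_pos hcc, e1]
        by_cases hi : min i (n - 1 - i) = a <;> simp [hi, if_pos hcc]
      · rw [if_neg hcc, e1, e2]
        by_cases hi : min i (n - 1 - i) = a <;> simp [hi, if_neg hcc]
    · intro x hx0 hxm hxc hxc2
      have h2 : min x (m - 1 - x) ≠ c := by omega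
      simp [pvKeyF, h2]
  rw [pvSum_congr (fun i h1 h2 => hinner i)]
  rw [pvSum_support_pair _ 0 n a (n - 1 - a) (by omega) (by omega) (by omega) ?_]
  · have h1 : min a (n - 1 - a) = a := by omega
    have h2 : min (n - 1 - a) (n - 1 - (n - 1 - a)) = a := by omega
    by_cases hnn : a = n - 1 - a
    · rw [if_pos hnn, if_pos hnn, if_pos h1]
    · rw [if_neg hnn, if_neg hnn, if_pos h1, if_pos h2]
  · intro x hx0 hxn hxa hxa2
    have h3 : min x (n - 1 - x) ≠ a := by omega
    rw [if_neg h3]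

lemma ct_eq (n m : Int) (k : Int × Int) :
    pvCT n m k = (((pvCells n m).countP (fun p => pvKeyF n m p == k) : Nat) : Int) := by
  unfold pvCT
  rw [List.count_eq_countP, List.countP_map]
  rfl

lemma cb_eq (grid : List (List String)) (n m : Int) (k : Int × Int) :
    pvCB grid n m k = (((pvCells n m).countP
      (fun p => (pvKeyF n m p == k) && (pvCell grid p.1 p.2 == "B")) : Nat) : Int) := by
  unfold pvCB
  rw [List.count_eq_countP, List.countP_map, List.countP_filter]
  rfl

lemma term_eq (grid : List (List String)) (n m a c : Int)
    (ha0 : 0 ≤ a) (ha : 2 * a < n) (hc0 : 0 ≤ c) (hc : 2 * c < m) :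
    pvTermA grid n m a c = min (pvCB grid n m (a, c)) (pvCT n m (a, c) - pvCB grid n m (a, c)) := by
  have hct := countP_orbit n m a c (fun _ _ => true) ha0 ha hc0 hc
  have hcb := countP_orbit n m a c (fun i j => pvCell grid i j == "B") ha0 ha hc0 hc
  simp only [Bool.and_true] at hct
  beta_reduce at hct hcb
  rw [ct_eq, cb_eq, hct, hcb]
  simp only [pvTermA]
  set na := n - 1 - a with hna
  set mc := m - 1 - c with hmc
  by_cases hnn : a = na <;> by_cases hcc : c = mc <;>
    simp only [hnn, hcc, ne_eq, not_true_eq_false, not_false_eq_true,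
      if_true, if_false, List.cons_append, List.nil_append,
      List.foldl_cons, List.foldl_nil] <;>
    split_ifs <;> simp

lemma quad_nodup (n m : Int) : (pvQuad n m).Nodup := by
  have h : pvQuad n m = (PySem.List.pyRange 0 (-(PySem.Int.floordiv (-n) 2)) 1) ×ˢ
      (PySem.List.pyRange 0 (-(PySem.Int.floordiv (-m) 2)) 1) := rfl
  rw [h]
  exact List.Nodup.product (PySem.List.nodup_pyRange_one _ _) (PySem.List.nodup_pyRange_one _ _)

lemma keys_perm (n m : Int) :
    (PySem.Set.ofList ((pvCells n m).map (pvKeyF n m))).Perm (pvQuad n m) := by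
  rw [List.perm_ext_iff_of_nodup (PySem.Set.nodup_ofList _) (quad_nodup n m)]
  intro k
  rw [PySem.Set.mem_ofList]
  have e3 : -(PySem.Int.floordiv (-n) 2) = n / 2 + n % 2 := by
    rw [PySem.Int.floordiv_eq_ediv_of_pos (by norm_num : (0:Int) < 2)]; omega
  have e4 : -(PySem.Int.floordiv (-m) 2) = m / 2 + m % 2 := by
    rw [PySem.Int.floordiv_eq_ediv_of_pos (by norm_num : (0:Int) < 2)]; omega
  simp only [pvCells, pvQuad, pvKeyF, e3, e4, List.mem_flatMap, List.mem_map,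
    PySem.List.mem_pyRange_one]
  constructor
  · rintro ⟨p, ⟨i, ⟨hi, j, hj, rfl⟩⟩, rfl⟩
    exact ⟨min i (n - 1 - i), ⟨by omega, min j (m - 1 - j), by omega, rfl⟩⟩
  · rintro ⟨a, ⟨ha, c, hc, rfl⟩⟩
    refine ⟨(a, c), ⟨a, ⟨by omega, c, by omega, rfl⟩⟩, ?_⟩
    have h1 : min a (n - 1 - a) = a := by omega
    have h2 : min c (m - 1 - c) = c := by omega
    rw [h1, h2]
lemma pvFinal (grid : List (List String)) :
    minOperationToSymmetric grid = minOperationToSymmetric_alt grid := by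
  rw [A_quad, B_char]
  have hperm := keys_perm (grid.length : Int) ((PySem.List.pyGetD grid 0 ([] : List String)).length : Int)
  rw [List.Perm.sum_eq (hperm.map (fun k =>
    min (pvCB grid (grid.length : Int) ((PySem.List.pyGetD grid 0 ([] : List String)).length : Int) k)
      (pvCT (grid.length : Int) ((PySem.List.pyGetD grid 0 ([] : List String)).length : Int) k
        - pvCB grid (grid.length : Int) ((PySem.List.pyGetD grid 0 ([] : List String)).length : Int) k)))]
  congr 1
  apply List.map_congr_left
  intro k hk
  obtain ⟨a, c⟩ := k
  have e3 : -(PySem.Int.floordiv (-(grid.length : Int)) 2) = (grid.length : Int) / 2 + (grid.length : Int) % 2 := by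
    rw [PySem.Int.floordiv_eq_ediv_of_pos (by norm_num : (0:Int) < 2)]; omega
  have e4 : -(PySem.Int.floordiv (-((PySem.List.pyGetD grid 0 ([] : List String)).length : Int)) 2)
      = ((PySem.List.pyGetD grid 0 ([] : List String)).length : Int) / 2
        + ((PySem.List.pyGetD grid 0 ([] : List String)).length : Int) % 2 := by
    rw [PySem.Int.floordiv_eq_ediv_of_pos (by norm_num : (0:Int) < 2)]; omega
  simp only [pvQuad, e3, e4, List.mem_flatMap, List.mem_map, PySem.List.mem_pyRange_one] at hk
  obtain ⟨a', ⟨ha', c', hc', heq⟩⟩ := hk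
  injection heq with h1 h2
  subst h1; subst h2
  exact term_eq grid _ _ _ _ (by omega) (by omega) (by omega) (by omega)

-- ===== VERDICT (by name: the statement is the Claim_ definition above) =====
theorem minOperationToSymmetric_spec : Claim_equal_minOperationToSymmetric := by
  intro grid _ _
  unfold Spec_minOperationToSymmetric
  exact pvFinal grid
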